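-- pv_equiv track=rewrite | github.com/emmacwatts/PeptideCountingandTAG | PeptideCounting/theoreticalLabellingFunctions.py | cutSiteSearchRegions
-- ===== SOURCE A (Python) =====
-- def cutSiteSearchRegions(proteinSequence, cutsites = ['R', 'K']):
--     """
--     Determines search regions for peptides - proteinSequences cleaved to start at each possible cutsite.
--
--     params:
--         proteinSequence: the protein sequence of interest (str)
--         cutSites: list of amino acids at which the enzyme cuts (list of str)
--
--     returns:
--         searchRegions: proteinSequence cleaved to begin at each cutsite in the sequence (list of str)
--
--      """
--     #This will be a list of all cut sites in the sequence, with start 0. start sites of peptides will iterate through this list.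
--     cutSitePositions = []
--
--     #Iterate through the sequence and collect all cut site positions
--     for index, aa in enumerate(proteinSequence):
--         if aa in cutsites:
--             cutSitePositions.append(index)
--
--     searchRegions = [proteinSequence] #starting region will be the whole protein (starts at 0)
--     for cutSite in cutSitePositions:
--             searchRegions.append(proteinSequence[cutSite+1:]) #note that this is +1 as the cut peptide itself should be left of the cut site
--
--     return searchRegions
-- ===== SOURCE B (Python) =====
-- def cutSiteSearchRegions(proteinSequence, cutsites = ['R', 'K']):
--     """Right-to-left scan building each suffix incrementally (no slicing, no
--     index table): walking backwards, `suffix` is always the text to the right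
--     of the current character, so at a cut site it IS the region to emit."""
--     suffix = ''
--     tails = []
--     for aa in reversed(proteinSequence):
--         if aa in cutsites:
--             tails.append(suffix)
--         suffix = aa + suffix
--     tails.append(suffix)  # the whole sequence
--     tails.reverse()
--     return tails
-- ===== Notes on version B (the rewrite author's own statement) =====
-- stated objective: alternative
-- what changed: B scans the sequence right-to-left, growing the current suffix one character at a time instead of slicing, so each emitted region is the maintained suffix itself; the results are collected in descending position order and reversed at the end, eliminating both A's index table and all slicing.
import Mathlib
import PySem

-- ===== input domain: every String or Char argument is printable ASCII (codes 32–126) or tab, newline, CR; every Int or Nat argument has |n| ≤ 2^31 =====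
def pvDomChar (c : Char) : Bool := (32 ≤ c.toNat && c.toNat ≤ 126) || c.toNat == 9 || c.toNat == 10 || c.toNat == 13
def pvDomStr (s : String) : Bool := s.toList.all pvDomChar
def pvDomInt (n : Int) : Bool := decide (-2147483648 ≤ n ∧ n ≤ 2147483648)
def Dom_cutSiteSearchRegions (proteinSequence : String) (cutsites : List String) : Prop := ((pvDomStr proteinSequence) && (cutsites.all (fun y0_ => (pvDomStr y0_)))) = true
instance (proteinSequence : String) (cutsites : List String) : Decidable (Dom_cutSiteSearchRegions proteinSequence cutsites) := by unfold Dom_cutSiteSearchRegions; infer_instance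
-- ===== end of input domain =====

-- B replaces A's index-table-then-slice construction by a right-to-left scan that grows each suffix incrementally; same return value proved.


-- ===== PORT A =====
-- Port of A: first collect cut-site positions, then build suffixes by slicing at each.
def cutSiteSearchRegions (proteinSequence : String) (cutsites : List String) : List String :=
  let cutSitePositions : List Int :=
    (PySem.List.enumerate proteinSequence.toList 0).foldl
      (fun acc p => if cutsites.contains (String.singleton p.2) then acc ++ [p.1] else acc) []
  cutSitePositions.foldl
    (fun acc cutSite => acc ++ [PySem.Str.slice proteinSequence (some (cutSite + 1)) none])
    [proteinSequence]

-- ===== PORT B =====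
-- Port of B: scan the reversed sequence, maintaining the suffix to the right of the
-- current character (as its char list) and emitting it at each cut site; then append
-- the whole sequence and reverse the collected list.
def cutSiteSearchRegions_alt (proteinSequence : String) (cutsites : List String) : List String :=
  let st := proteinSequence.toList.reverse.foldl
    (fun (st : List Char × List String) aa =>
      let st := if cutsites.contains (String.singleton aa) then (st.1, st.2 ++ [String.ofList st.1]) else st
      (aa :: st.1, st.2))
    ([], [])
  (st.2 ++ [String.ofList st.1]).reverse

-- ===== PRECONDITION & SPEC =====
def Spec_cutSiteSearchRegions (proteinSequence : String) (cutsites : List String) (out : List String) : Prop := out = cutSiteSearchRegions_alt proteinSequence cutsites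
instance (proteinSequence : String) (cutsites : List String) (out : List String) : Decidable (Spec_cutSiteSearchRegions proteinSequence cutsites out) := by unfold Spec_cutSiteSearchRegions; infer_instance

-- ===== CLAIM (what is proved, stated in full; the proofs are below) =====
def Claim_equal_cutSiteSearchRegions : Prop := ∀ (proteinSequence : String) (cutsites : List String), Dom_cutSiteSearchRegions proteinSequence cutsites → Spec_cutSiteSearchRegions proteinSequence cutsites (cutSiteSearchRegions proteinSequence cutsites)

-- ===== LEMMAS AND PROOFS =====

-- Reference value both ports are proved equal to: the suffix after each cut
-- position, in ascending position order.
def ascSuffixes (cond : Char → Bool) : List Char → List String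
  | [] => []
  | a :: rest => (if cond a then [String.ofList rest] else []) ++ ascSuffixes cond rest

-- A-side fusion: folding the collected positions through `f` equals collecting-and-mapping in one pass.
theorem fuse_foldl {α : Type} (c : Int × Char → Bool) (f : Int → α)
    (l : List (Int × Char)) (acc : List Int) (out : List α) :
    (l.foldl (fun a p => if c p then a ++ [p.1] else a) acc).foldl
        (fun s i => s ++ [f i]) out
      = l.foldl (fun s p => if c p then s ++ [f p.1] else s)
          (acc.foldl (fun s i => s ++ [f i]) out) := by
  induction l generalizing acc out with
  | nil => rfl
  | cons p l ih =>
      simp only [List.foldl_cons]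
      by_cases h : c p
      · simp [h, ih, List.foldl_append]
      · simp [h, ih]

-- A-side: the fused enumerate-fold over a suffix of s produces ascSuffixes.
theorem enumFold (s : String) (cond : Char → Bool) :
    ∀ (L : List Char) (k : ℕ) (acc : List String), s.toList.drop k = L →
      (PySem.List.enumerate L (k : Int)).foldl
          (fun a p => if cond p.2 then a ++ [PySem.Str.slice s (some (p.1 + 1)) none] else a) acc
        = acc ++ ascSuffixes cond L := by
  intro L
  induction L with
  | nil => intro k acc _; simp [PySem.List.enumerate_nil, ascSuffixes]
  | cons a rest ih =>
      intro k acc hk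
      have hrest : s.toList.drop (k + 1) = rest := by
        have h : s.toList.drop (k + 1) = (s.toList.drop k).drop 1 := (List.drop_drop).symm
        rw [h, hk]; rfl
      have hcast : ((k : Int) + 1) = (((k + 1 : ℕ) : Int)) := by push_cast; ring
      have hslice : PySem.Str.slice s (some ((k : Int) + 1)) none = String.ofList rest := by
        have h1 : (PySem.Str.slice s (some ((k : Int) + 1)) none).toList = rest := by
          rw [PySem.Str.toList_slice, PySem.Chars.slice_eq_listSlice, hcast,
            PySem.List.slice_from_natCast, hrest]
        have h2 := congrArg String.ofList h1
        rwa [String.ofList_toList] at h2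
      rw [PySem.List.enumerate_cons]
      simp only [List.foldl_cons, hcast]
      rw [hcast] at hslice
      rw [hslice]
      by_cases h : cond a
      · rw [if_pos h, ih (k + 1) (acc ++ [String.ofList rest]) hrest]
        simp [ascSuffixes, h]
      · rw [if_neg h, ih (k + 1) acc hrest]
        simp [ascSuffixes, h]

-- B-side: the right-to-left scan (as a foldr) yields the full list and the
-- emitted suffixes in descending position order.
theorem foldrB (cond : Char → Bool) :
    ∀ L : List Char,
      L.foldr
        (fun aa (st : List Char × List String) =>
          let st' := if cond aa then (st.1, st.2 ++ [String.ofList st.1]) else st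
          (aa :: st'.1, st'.2))
        ([], [])
      = (L, (ascSuffixes cond L).reverse) := by
  intro L
  induction L with
  | nil => simp [ascSuffixes]
  | cons a rest ih =>
      simp only [List.foldr_cons, ih]
      by_cases h : cond a
      · simp [h, ascSuffixes]
      · simp [h, ascSuffixes]

-- ===== VERDICT (by name: the statement is the Claim_ definition above) =====
theorem cutSiteSearchRegions_spec : Claim_equal_cutSiteSearchRegions := by
  intro s cutsites _
  unfold Spec_cutSiteSearchRegions cutSiteSearchRegions cutSiteSearchRegions_alt
  have ha :
      ((PySem.List.enumerate s.toList 0).foldl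
          (fun acc p => if cutsites.contains (String.singleton p.2) then acc ++ [p.1] else acc) []).foldl
        (fun acc cutSite => acc ++ [PySem.Str.slice s (some (cutSite + 1)) none]) [s]
      = s :: ascSuffixes (fun c => cutsites.contains (String.singleton c)) s.toList := by
    rw [fuse_foldl (fun p => cutsites.contains (String.singleton p.2))
        (fun i => PySem.Str.slice s (some (i + 1)) none)]
    have h0 := enumFold s (fun c => cutsites.contains (String.singleton c)) s.toList 0 [s] (by simp)
    simpa using h0
  have hb :
      (s.toList.reverse.foldl
        (fun (st : List Char × List String) aa =>
          let st' := if cutsites.contains (String.singleton aa) then (st.1, st.2 ++ [String.ofList st.1]) else st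
          (aa :: st'.1, st'.2))
        ([], []))
      = (s.toList, (ascSuffixes (fun c => cutsites.contains (String.singleton c)) s.toList).reverse) := by
    rw [List.foldl_reverse]
    exact foldrB (fun c => cutsites.contains (String.singleton c)) s.toList
  rw [ha, hb]
  simp [String.ofList_toList]
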